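-- pv_equiv track=rewrite | github.com/g0ulash/webscale | mini-proto/ad_recommenders.py | product_id_to_dummy
-- ===== SOURCE A (Python) =====
-- def product_id_to_dummy(ad):
--     dummys = []
--     for i in range(0,16):
--         if (ad['productid'] - 10) == i:
--             dummys.append(1)
--         else:
--             dummys.append(0)
--     return dummys
-- ===== SOURCE B (Python) =====
-- def product_id_to_dummy(ad):
--     v = ad['productid'] - 10
--     dummys = [0] * 16
--     if v in range(16):
--         dummys[int(v)] = 1
--     return dummys
-- ===== Notes on version B (the rewrite author's own statement) =====
-- stated objective: simpler
-- what changed: Replaces the 16-iteration scan comparing each slot against productid-10 with a preallocated zero vector and one direct indexed assignment guarded by a range-membership test.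
import Mathlib
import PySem

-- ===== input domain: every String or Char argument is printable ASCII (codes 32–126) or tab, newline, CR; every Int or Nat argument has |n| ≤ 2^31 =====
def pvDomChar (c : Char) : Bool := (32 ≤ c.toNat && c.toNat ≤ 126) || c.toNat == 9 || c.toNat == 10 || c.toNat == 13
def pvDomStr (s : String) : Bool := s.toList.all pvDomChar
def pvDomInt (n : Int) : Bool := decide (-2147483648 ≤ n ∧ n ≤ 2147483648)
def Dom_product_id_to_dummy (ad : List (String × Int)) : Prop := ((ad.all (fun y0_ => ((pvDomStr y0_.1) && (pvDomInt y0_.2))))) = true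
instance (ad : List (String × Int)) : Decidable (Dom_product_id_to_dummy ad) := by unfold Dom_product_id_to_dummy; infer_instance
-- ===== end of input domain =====

-- B replaces A's 16-slot equality scan with a zero vector and one direct indexed assignment (simpler).


-- ===== PORT A =====
def product_id_to_dummy (ad : List (String × Int)) : List Int :=
  match (PySem.Dict.mk ad).get? "productid" with
  | none => []   -- KeyError in Python; excluded by Pre_
  | some p =>
      (PySem.List.pyRange 0 16 1).foldl
        (fun dummys i => dummys ++ [if p - 10 == i then (1 : Int) else 0]) []

-- ===== PORT B =====
def product_id_to_dummy_alt (ad : List (String × Int)) : List Int :=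
  match (PySem.Dict.mk ad).get? "productid" with
  | none => []   -- KeyError in Python; excluded by Pre_
  | some p =>
      let v := p - 10
      let dummys := List.replicate 16 (0 : Int)
      if 0 ≤ v ∧ v < 16 then dummys.set v.toNat 1 else dummys

-- ===== PRECONDITION & SPEC =====
-- Pre_: the ad dict must contain key 'productid'; otherwise A (and B) raise KeyError.
def Pre_product_id_to_dummy (ad : List (String × Int)) : Prop :=
  ((PySem.Dict.mk ad).get? "productid").isSome = true
instance (ad : List (String × Int)) : Decidable (Pre_product_id_to_dummy ad) := by
  unfold Pre_product_id_to_dummy; infer_instance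
def pvWitness_product_id_to_dummy : (List (String × Int)) := [("productid", 12)]

def Spec_product_id_to_dummy (ad : List (String × Int)) (out : List Int) : Prop := out = product_id_to_dummy_alt ad
instance (ad : List (String × Int)) (out : List Int) : Decidable (Spec_product_id_to_dummy ad out) := by unfold Spec_product_id_to_dummy; infer_instance

-- ===== CLAIM (what is proved, stated in full; the proofs are below) =====
def Claim_equal_product_id_to_dummy : Prop := ∀ (ad : List (String × Int)), Dom_product_id_to_dummy ad → Pre_product_id_to_dummy ad → Spec_product_id_to_dummy ad (product_id_to_dummy ad)

-- ===== LEMMAS AND PROOFS =====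
theorem scan_eq_set (p : Int) :
    (PySem.List.pyRange 0 16 1).foldl
        (fun dummys i => dummys ++ [if p - 10 == i then (1 : Int) else 0]) [] =
    (if 0 ≤ p - 10 ∧ p - 10 < 16 then (List.replicate 16 (0 : Int)).set (p - 10).toNat 1
     else List.replicate 16 (0 : Int)) := by
  have hr : PySem.List.pyRange 0 16 1 =
      [0,1,2,3,4,5,6,7,8,9,10,11,12,13,14,15] := by decide
  rw [hr]
  by_cases h : 0 ≤ p - 10 ∧ p - 10 < 16
  · obtain ⟨h0, h1⟩ := h
    have hlo : 10 ≤ p := by omega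
    have hhi : p ≤ 25 := by omega
    interval_cases p <;> simp [List.foldl]
  · simp only [if_neg h]
    have : ∀ i : Int, i ∈ ([0,1,2,3,4,5,6,7,8,9,10,11,12,13,14,15] : List Int) →
        (p - 10 == i) = false := by
      intro i hi; simp only [beq_eq_false_iff_ne]
      fin_cases hi <;> omega
    simp only [List.foldl]
    rw [this 0 (by simp), this 1 (by simp), this 2 (by simp), this 3 (by simp),
        this 4 (by simp), this 5 (by simp), this 6 (by simp), this 7 (by simp),
        this 8 (by simp), this 9 (by simp), this 10 (by simp), this 11 (by simp),
        this 12 (by simp), this 13 (by simp), this 14 (by simp), this 15 (by simp)]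
    decide

-- ===== VERDICT (by name: the statement is the Claim_ definition above) =====
theorem product_id_to_dummy_spec : Claim_equal_product_id_to_dummy := by
  intro ad _ hpre
  unfold Spec_product_id_to_dummy product_id_to_dummy product_id_to_dummy_alt
  cases hget : (PySem.Dict.mk ad).get? "productid" with
  | none => rfl
  | some p => exact scan_eq_set p
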